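-- pv_equiv track=rewrite | github.com/Licho59/Licho-repository | inne_projekty/problem_solving_with_algorithms/recursive_string_reversion.py | reversedList
-- ===== SOURCE A (Python) =====
-- def reversedList(expression):
--     temp = expression
--     if temp == []:
--         return None
--     if len(temp) == 1:
--         return temp
--     else:
--         return reversedList(temp[1:]) + list(temp[0])
-- ===== SOURCE B (Python) =====
-- def reversedList(expression):
--     if not expression:
--         return None
--     out = [expression[-1]]
--     for s in reversed(expression[:-1]):
--         out.extend(s)
--     return out
-- ===== Notes on version B (the rewrite author's own statement) =====
-- stated objective: faster
-- what changed: Replaced the recursion that rebuilds the list with '+' on every step (quadratic copying) by a single iterative pass that walks the non-last elements back-to-front and extends one accumulator with their characters.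
import Mathlib
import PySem

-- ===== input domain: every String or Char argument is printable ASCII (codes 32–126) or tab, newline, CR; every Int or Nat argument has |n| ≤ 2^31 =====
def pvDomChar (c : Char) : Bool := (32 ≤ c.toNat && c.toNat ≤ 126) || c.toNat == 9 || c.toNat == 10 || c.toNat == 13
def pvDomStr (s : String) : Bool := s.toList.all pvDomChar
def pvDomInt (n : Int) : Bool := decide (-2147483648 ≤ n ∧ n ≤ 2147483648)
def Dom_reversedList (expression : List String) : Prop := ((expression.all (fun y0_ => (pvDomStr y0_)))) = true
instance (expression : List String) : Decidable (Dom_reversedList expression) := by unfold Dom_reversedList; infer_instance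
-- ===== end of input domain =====

-- B iterates once instead of A's recursion with quadratic '+' concatenations; same return value.

-- ===== PORT A =====
-- Python's list(s) on a string: the list of its characters as 1-char strings (exact on all inputs)
def pvChars (s : String) : List String := s.toList.map (fun c => String.mk [c])

def reversedList (expression : List String) : Option (List String) :=
  match expression with
  | [] => none
  | [x] => some [x]
  | x :: xs =>
    -- return reversedList(temp[1:]) + list(temp[0]); the recursive call is never None here
    (reversedList xs).map (fun r => r ++ pvChars x)

-- ===== PORT B =====
def reversedList_alt (expression : List String) : Option (List String) :=
  match expression.getLast? with
  | none => none
  | some last =>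
    some ((expression.dropLast.reverse).foldl (fun out s => out ++ pvChars s) [last])

-- ===== PRECONDITION & SPEC =====
def Spec_reversedList (expression : List String) (out : Option (List String)) : Prop := out = reversedList_alt expression
instance (expression : List String) (out : Option (List String)) : Decidable (Spec_reversedList expression out) := by unfold Spec_reversedList; infer_instance

-- ===== CLAIM (what is proved, stated in full; the proofs are below) =====
def Claim_equal_reversedList : Prop := ∀ (expression : List String), Dom_reversedList expression → Spec_reversedList expression (reversedList expression)

-- ===== LEMMAS AND PROOFS =====
theorem reversedList_eq_alt : ∀ (expression : List String), reversedList expression = reversedList_alt expression := by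
  intro e
  induction e with
  | nil => rfl
  | cons x xs ih =>
    cases xs with
    | nil => rfl
    | cons y ys =>
      simp only [reversedList, ih, reversedList_alt]
      cases h : (y :: ys).getLast? with
      | none => simp at h
      | some last =>
        simp [List.getLast?_cons_cons, h, List.dropLast, List.foldl_append]

-- ===== VERDICT (by name: the statement is the Claim_ definition above) =====
theorem reversedList_spec : Claim_equal_reversedList := by
  intro e _
  exact reversedList_eq_alt e
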